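-- pv_equiv track=rewrite | github.com/lmb633/leetcode | 1163lastSubstring.py | lastSubstring
-- ===== SOURCE A (Python) =====
-- def lastSubstring(s):
--     length = len(s)
--     cur_max = length - 1
--     left = length - 2
--     while left >= 0:
--         if s[left] > s[cur_max]:
--             cur_max = left
--         elif s[left] == s[cur_max]:
--             while left - 1 >= 0 and s[left - 1] == s[left]:
--                 left -= 1
--             flag = 0
--             i = 1
--             while cur_max + i < length:
--                 if s[cur_max + i] > s[left + i]:
--                     flag = 1
--                     break
--                 elif s[cur_max + i] < s[left + i]:
--                     break
--                 i += 1
--             if flag == 0: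
--                 cur_max = left
--         left -= 1
--
--     return s[cur_max:]
-- ===== SOURCE B (Python) =====
-- def lastSubstring(s):
--     n = len(s)
--     i, j, k = 0, 1, 0
--     while j + k < n:
--         a, b = s[i + k], s[j + k]
--         if a == b:
--             k += 1
--         elif a > b:
--             j = j + k + 1
--             k = 0
--         else:
--             i = max(i + k + 1, j)
--             j = i + 1
--             k = 0
--     return s[i:]
-- ===== Notes on version B (the rewrite author's own statement) =====
-- stated objective: alternative
-- what changed: Replaced A's right-to-left candidate scan with its nested run-skip and suffix-comparison loops by a single left-to-right two-pointer maximal-suffix scan (Duval-style i/j/k loop); measured speed on generated inputs is about the same.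
import Mathlib
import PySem

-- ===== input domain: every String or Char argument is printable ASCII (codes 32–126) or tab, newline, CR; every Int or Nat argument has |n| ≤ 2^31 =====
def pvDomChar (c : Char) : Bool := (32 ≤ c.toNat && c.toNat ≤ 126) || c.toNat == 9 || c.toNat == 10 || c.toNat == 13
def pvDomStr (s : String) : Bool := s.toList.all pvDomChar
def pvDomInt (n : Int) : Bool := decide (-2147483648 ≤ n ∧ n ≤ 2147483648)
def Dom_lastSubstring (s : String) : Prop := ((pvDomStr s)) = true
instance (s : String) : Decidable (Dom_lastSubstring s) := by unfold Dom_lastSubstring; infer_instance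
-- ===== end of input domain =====

-- B replaces A's right-to-left candidate scan (with its nested run-skip and suffix-compare
-- loops) by a single left-to-right two-pointer maximal-suffix scan; the theorem proves the
-- returned values equal on every input.

-- ===== PORT A =====
-- small termination facts, cited in the ports' decreasing_by (kept tiny on purpose)
theorem tcore (a : Int) (h : 0 < a) : (a - 1).toNat < a.toNat :=
  (Int.toNat_lt_toNat h).mpr (sub_one_lt a)
theorem decA (l : Int) (h : l - 1 ≥ 0) : (l - 1).toNat < l.toNat :=
  tcore l (lt_of_lt_of_le zero_lt_one (Int.sub_nonneg.mp h))
theorem decB (c i b : Int) (h : c + i < b) :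
    (b - (c + (i + 1))).toNat < (b - (c + i)).toNat := by
  rw [← add_assoc, sub_add_eq_sub_sub]
  exact tcore (b - (c + i)) (Int.sub_pos.mpr h)
theorem decC (l l' : Int) (h : l ≥ 0) (h2 : l' ≤ l) : (l' - 1 + 1).toNat < (l + 1).toNat := by
  rw [Int.sub_add_cancel]
  have h3 := tcore (l + 1) (Int.lt_add_one_iff.mpr h)
  rw [Int.add_sub_cancel] at h3
  exact lt_of_le_of_lt (Int.toNat_le_toNat h2) h3
theorem decD (n j k : Nat) (h : j + k < n) : n - (k + 1) < n - k :=
  Nat.sub_lt_sub_left (lt_of_le_of_lt (Nat.le_add_left k j) h) (Nat.lt_succ_self k)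
theorem decE (n j k : Nat) (h : j + k < n) : n - (j + k + 1) < n - j :=
  Nat.sub_lt_sub_left (lt_of_le_of_lt (Nat.le_add_right j k) h)
    (Nat.lt_succ_of_le (Nat.le_add_right j k))
theorem decF (n i j k : Nat) (h : j + k < n) : n - (max (i + k + 1) j + 1) < n - j :=
  Nat.sub_lt_sub_left (lt_of_le_of_lt (Nat.le_add_right j k) h)
    (Nat.lt_succ_of_le (le_max_right (i + k + 1) j))

-- inner 'while left - 1 >= 0 and s[left - 1] == s[left]: left -= 1'
def skipA (cs : List Char) (left : Int) : Int :=
  if h : left - 1 ≥ 0 ∧ PySem.List.pyGetD cs (left - 1) ' ' = PySem.List.pyGetD cs left ' ' then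
    skipA cs (left - 1)
  else left
termination_by left.toNat
decreasing_by exact decA left h.1

-- termination helper for loopA (cited in its decreasing_by)
theorem skipA_le (cs : List Char) (left : Int) : skipA cs left ≤ left := by
  have key : ∀ (n : Nat) (l : Int), l.toNat ≤ n → skipA cs l ≤ l := by
    intro n
    induction n with
    | zero =>
      intro l hl
      rw [skipA]
      split
      · rename_i h
        exact absurd (le_trans (Int.toNat_le_toNat (Int.sub_nonneg.mp h.1)) hl) (by decide)
      · exact le_refl l
    | succ n ih =>
      intro l hl
      rw [skipA]
      split
      · rename_i h
        have h2 := ih (l - 1) (by rw [Int.pred_toNat]; exact Nat.sub_le_sub_right hl 1)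
        exact le_trans h2 (sub_le_self l zero_le_one)
      · exact le_refl l
  exact key left.toNat left le_rfl

-- inner 'flag = 0; i = 1; while cur_max + i < length: …' loop; returns the final flag
def cmpA (cs : List Char) (cur_max left i : Int) : Int :=
  if h : cur_max + i < (cs.length : Int) then
    if PySem.List.pyGetD cs (cur_max + i) ' ' > PySem.List.pyGetD cs (left + i) ' ' then 1
    else if PySem.List.pyGetD cs (cur_max + i) ' ' < PySem.List.pyGetD cs (left + i) ' ' then 0
    else cmpA cs cur_max left (i + 1)
  else 0
termination_by ((cs.length : Int) - (cur_max + i)).toNat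
decreasing_by exact decB cur_max i _ h

-- outer 'while left >= 0' loop; returns the final cur_max
def loopA (cs : List Char) (cur_max left : Int) : Int :=
  if h : left ≥ 0 then
    if PySem.List.pyGetD cs left ' ' > PySem.List.pyGetD cs cur_max ' ' then
      loopA cs left (left - 1)
    else if PySem.List.pyGetD cs left ' ' = PySem.List.pyGetD cs cur_max ' ' then
      let left' := skipA cs left
      if cmpA cs cur_max left' 1 = 0 then
        loopA cs left' (left' - 1)
      else
        loopA cs cur_max (left' - 1)
    else
      loopA cs cur_max (left - 1)
  else cur_max
termination_by (left + 1).toNat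
decreasing_by
  · exact decC left left h le_rfl
  · exact decC left (skipA cs left) h (skipA_le cs left)
  · exact decC left (skipA cs left) h (skipA_le cs left)
  · exact decC left left h le_rfl

def lastSubstring (s : String) : String :=
  let cs := s.toList
  let length : Int := cs.length
  let cur_max := loopA cs (length - 1) (length - 2)
  String.ofList (PySem.List.slice cs (some cur_max) none)

-- ===== PORT B =====
-- the 'while j + k < n' two-pointer scan of Source B; i, j, k never go negative, so they are Nats
def duvalLoop (cs : List Char) (i j k : Nat) : Nat :=
  if h : j + k < cs.length then
    let a := PySem.List.pyGetD cs ((i + k : Nat) : Int) ' '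
    let b := PySem.List.pyGetD cs ((j + k : Nat) : Int) ' '
    if a = b then duvalLoop cs i j (k + 1)
    else if a > b then duvalLoop cs i (j + k + 1) 0
    else
      let i' := max (i + k + 1) j
      duvalLoop cs i' (i' + 1) 0
  else i
termination_by (cs.length - j, cs.length - k)
decreasing_by
  · right; exact decD cs.length j k h
  · left; exact decE cs.length j k h
  · left; exact decF cs.length i j k h

def lastSubstring_alt (s : String) : String :=
  let cs := s.toList
  let i := duvalLoop cs 0 1 0
  String.ofList (PySem.List.slice cs (some (i : Int)) none)

-- ===== PRECONDITION & SPEC =====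
def Spec_lastSubstring (s : String) (out : String) : Prop := out = lastSubstring_alt s
instance (s : String) (out : String) : Decidable (Spec_lastSubstring s out) := by unfold Spec_lastSubstring; infer_instance

-- ===== CLAIM (what is proved, stated in full; the proofs are below) =====
def Claim_equal_lastSubstring : Prop := ∀ (s : String), Dom_lastSubstring s → Spec_lastSubstring s (lastSubstring s)

-- ===== LEMMAS AND PROOFS =====

-- bridge: an in-range Python index read is List.getD at the Nat index
theorem pg_bridge (cs : List Char) (m : Int) (h0 : 0 ≤ m) (_hn : m < (cs.length : Int)) :
    PySem.List.pyGetD cs m ' ' = cs.getD m.toNat ' ' := by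
  have e : m = ((m.toNat : Nat) : Int) := by omega
  rw [e, PySem.List.pyGetD_natCast]
  congr 1

theorem pgn (cs : List Char) (m : Nat) :
    PySem.List.pyGetD cs ((m : Nat) : Int) ' ' = cs.getD m ' ' := by
  rw [PySem.List.pyGetD_natCast]

theorem gd_elem (cs : List Char) (m : Nat) (h : m < cs.length) : cs.getD m ' ' = cs[m] :=
  List.getD_eq_getElem cs ' ' h

-- a::u ≤ a::v ↔ u ≤ v and a::u < a::v ↔ u < v for the lexicographic order on List Char
theorem consLe (a : Char) (u v : List Char) : (a :: u ≤ a :: v) ↔ u ≤ v := by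
  rw [← not_lt, ← not_lt, List.cons_lt_cons_iff]
  simp

theorem consLtSame (a : Char) (u v : List Char) : (a :: u < a :: v) ↔ u < v := by
  rw [List.cons_lt_cons_iff]
  simp

-- if two suffixes agree on their first k characters and then the a-side character is
-- smaller, the suffix at a is lexicographically smaller
theorem agree_lt (cs : List Char) (k : Nat) : ∀ a b : Nat,
    a + k < cs.length → b + k < cs.length →
    (∀ t, t < k → cs.getD (a + t) ' ' = cs.getD (b + t) ' ') →
    cs.getD (a + k) ' ' < cs.getD (b + k) ' ' →
    cs.drop a < cs.drop b := by
  induction k with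
  | zero =>
    intro a b ha hb _ hlast
    have ha' : a < cs.length := by omega
    have hb' : b < cs.length := by omega
    rw [List.drop_eq_getElem_cons ha', List.drop_eq_getElem_cons hb']
    refine List.Lex.rel ?_
    rwa [Nat.add_zero, Nat.add_zero, gd_elem cs a ha', gd_elem cs b hb'] at hlast
  | succ k ih =>
    intro a b ha hb H hlast
    have ha' : a < cs.length := by omega
    have hb' : b < cs.length := by omega
    rw [List.drop_eq_getElem_cons ha', List.drop_eq_getElem_cons hb']
    have h0 : cs[a] = cs[b] := by
      have := H 0 (Nat.succ_pos k)
      rwa [Nat.add_zero, Nat.add_zero, gd_elem cs a ha', gd_elem cs b hb'] at this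
    rw [h0, consLtSame]
    apply ih (a + 1) (b + 1) (by omega) (by omega)
    · intro t ht
      have := H (t + 1) (by omega)
      have e1 : a + (t + 1) = a + 1 + t := by omega
      have e2 : b + (t + 1) = b + 1 + t := by omega
      rwa [e1, e2] at this
    · have e1 : a + (k + 1) = a + 1 + k := by omega
      have e2 : b + (k + 1) = b + 1 + k := by omega
      rwa [e1, e2] at hlast

-- a longer suffix that extends a shorter one character-for-character dominates it
theorem agree_prefix (cs : List Char) : ∀ (m a b : Nat), cs.length - b = m →
    a < b → b ≤ cs.length →
    (∀ u, b + u < cs.length → cs.getD (a + u) ' ' = cs.getD (b + u) ' ') →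
    cs.drop b < cs.drop a := by
  intro m
  induction m with
  | zero =>
    intro a b hm hab hbn _
    have hb : b = cs.length := by omega
    rw [hb, List.drop_length, List.drop_eq_getElem_cons (show a < cs.length by omega)]
    exact List.nil_lt_cons _ _
  | succ m ih =>
    intro a b hm hab hbn H
    have hbl : b < cs.length := by omega
    have hal : a < cs.length := by omega
    rw [List.drop_eq_getElem_cons hbl, List.drop_eq_getElem_cons hal]
    have h0 : cs[a] = cs[b] := by
      have := H 0 (by omega)
      rwa [Nat.add_zero, Nat.add_zero, gd_elem cs a hal, gd_elem cs b hbl] at this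
    rw [h0, consLtSame]
    apply ih (a + 1) (b + 1) (by omega) (by omega) (by omega)
    intro u hu
    have := H (u + 1) (by omega)
    have e1 : a + (u + 1) = a + 1 + u := by omega
    have e2 : b + (u + 1) = b + 1 + u := by omega
    rwa [e1, e2] at this

-- ---- A-side loop facts ----

theorem skipA_nonneg (cs : List Char) (left : Int) (h : 0 ≤ left) : 0 ≤ skipA cs left := by
  fun_induction skipA cs left <;> omega

-- along the skipped run, consecutive characters are equal
theorem skipA_run (cs : List Char) (left : Int) :
    ∀ m : Int, skipA cs left ≤ m → m < left →
      PySem.List.pyGetD cs m ' ' = PySem.List.pyGetD cs (m + 1) ' ' := by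
  fun_induction skipA cs left with
  | case1 =>
    rename_i left h ih
    intro m h1 h2
    by_cases hm : m < left - 1
    · exact ih m h1 hm
    · have hm' : m = left - 1 := by omega
      subst hm'
      have e : left - 1 + 1 = left := by ring
      rw [e]
      exact h.2
  | case2 =>
    rename_i left h
    intro m h1 h2
    omega

-- all characters of a pairwise-equal run are equal to the last one
theorem run_const (cs : List Char) (L l : Nat)
    (Hpair : ∀ m : Nat, L ≤ m → m < l → cs.getD m ' ' = cs.getD (m + 1) ' ') :
    ∀ m : Nat, L ≤ m → m ≤ l → cs.getD m ' ' = cs.getD l ' ' := by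
  have key : ∀ d m, l - m = d → L ≤ m → m ≤ l → cs.getD m ' ' = cs.getD l ' ' := by
    intro d
    induction d with
    | zero =>
      intro m hd h1 h2
      have : m = l := by omega
      rw [this]
    | succ d ih =>
      intro m hd h1 h2
      have hml : m < l := by omega
      rw [Hpair m h1 hml]
      exact ih (m + 1) (by omega) (by omega) (by omega)
  exact fun m h1 h2 => key (l - m) m rfl h1 h2

-- run-chain bound, increasing case: every run suffix is at most the suffix after the run
theorem chain_up (cs : List Char) (L l : Nat) (hl : l < cs.length)
    (Hpair : ∀ m : Nat, L ≤ m → m < l → cs.getD m ' ' = cs.getD (m + 1) ' ')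
    (Hbase : cs.drop l ≤ cs.drop (l + 1)) :
    ∀ m : Nat, L ≤ m → m ≤ l → cs.drop m ≤ cs.drop (l + 1) := by
  have step : ∀ d m, l - m = d → L ≤ m → m ≤ l → cs.drop m ≤ cs.drop (m + 1) := by
    intro d
    induction d with
    | zero =>
      intro m hd h1 h2
      have : m = l := by omega
      rw [this]; exact Hbase
    | succ d ih =>
      intro m hd h1 h2
      have hml : m < l := by omega
      have hm : m < cs.length := by omega
      have hm1 : m + 1 < cs.length := by omega
      have hh : cs[m] = cs[m + 1] := by
        have := Hpair m h1 hml
        rwa [gd_elem cs m hm, gd_elem cs (m + 1) hm1] at this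
      rw [List.drop_eq_getElem_cons hm, List.drop_eq_getElem_cons hm1, hh, consLe,
        ← List.drop_eq_getElem_cons hm1]
      exact ih (m + 1) (by omega) (by omega) (by omega)
  have chain : ∀ d m, l - m = d → L ≤ m → m ≤ l → cs.drop m ≤ cs.drop (l + 1) := by
    intro d
    induction d with
    | zero =>
      intro m hd h1 h2
      have : m = l := by omega
      rw [this]; exact Hbase
    | succ d ih =>
      intro m hd h1 h2
      exact le_trans (step (l - m) m rfl h1 h2) (ih (m + 1) (by omega) (by omega) (by omega))
  exact fun m h1 h2 => chain (l - m) m rfl h1 h2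

-- run-chain bound, decreasing case: every run suffix is at most the run-start suffix
theorem chain_down (cs : List Char) (L l : Nat) (hl : l < cs.length)
    (Hpair : ∀ m : Nat, L ≤ m → m < l → cs.getD m ' ' = cs.getD (m + 1) ' ')
    (Hbase : cs.drop (l + 1) < cs.drop l) :
    ∀ m : Nat, L ≤ m → m ≤ l → cs.drop m ≤ cs.drop L := by
  have step : ∀ d m, l - m = d → L ≤ m → m ≤ l → cs.drop (m + 1) < cs.drop m := by
    intro d
    induction d with
    | zero =>
      intro m hd h1 h2
      have : m = l := by omega
      rw [this]; exact Hbase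
    | succ d ih =>
      intro m hd h1 h2
      have hml : m < l := by omega
      have hm : m < cs.length := by omega
      have hm1 : m + 1 < cs.length := by omega
      have hh : cs[m] = cs[m + 1] := by
        have := Hpair m h1 hml
        rwa [gd_elem cs m hm, gd_elem cs (m + 1) hm1] at this
      rw [List.drop_eq_getElem_cons hm, List.drop_eq_getElem_cons hm1, hh, consLtSame,
        ← List.drop_eq_getElem_cons hm1]
      exact ih (m + 1) (by omega) (by omega) (by omega)
  have chain : ∀ d, L + d ≤ l → cs.drop (L + d) ≤ cs.drop L := by
    intro d
    induction d with
    | zero => intro _; exact le_rfl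
    | succ d ih =>
      intro hd
      have h1 := step (l - (L + d)) (L + d) rfl (by omega) (by omega)
      have e : L + d + 1 = L + (d + 1) := by omega
      rw [e] at h1
      exact le_trans (le_of_lt h1) (ih (by omega))
  intro m h1 h2
  have e : m = L + (m - L) := by omega
  rw [e]
  exact chain (m - L) (by omega)

-- the inner comparison loop decides the order of the two candidate suffixes
theorem cmpA_spec (cs : List Char) (cm left' : Int) (hl : 0 ≤ left') (hlc : left' < cm)
    (_hcn : cm < (cs.length : Int)) :
    ∀ i : Int, 1 ≤ i → cm + i ≤ (cs.length : Int) →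
    (∀ t : Int, 0 ≤ t → t < i →
        PySem.List.pyGetD cs (cm + t) ' ' = PySem.List.pyGetD cs (left' + t) ' ') →
    (cmpA cs cm left' i = 0 ∧ cs.drop cm.toNat < cs.drop left'.toNat) ∨
    (cmpA cs cm left' i = 1 ∧ cs.drop left'.toNat < cs.drop cm.toNat) := by
  intro i
  fun_induction cmpA cs cm left' i with
  | case1 =>
    rename_i i hin hgt
    intro h1 h2 H
    right
    refine ⟨rfl, ?_⟩
    apply agree_lt cs i.toNat left'.toNat cm.toNat (by omega) (by omega)
    · intro t ht
      have hT := H (t : Int) (by omega) (by omega)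
      rw [pg_bridge cs (cm + (t : Int)) (by omega) (by omega),
        pg_bridge cs (left' + (t : Int)) (by omega) (by omega)] at hT
      have e1 : (cm + (t : Int)).toNat = cm.toNat + t := by omega
      have e2 : (left' + (t : Int)).toNat = left'.toNat + t := by omega
      rw [e1, e2] at hT
      exact hT.symm
    · have hgt' := hgt
      rw [pg_bridge cs (cm + i) (by omega) (by omega),
        pg_bridge cs (left' + i) (by omega) (by omega)] at hgt'
      have e1 : (cm + i).toNat = cm.toNat + i.toNat := by omega
      have e2 : (left' + i).toNat = left'.toNat + i.toNat := by omega
      rwa [e1, e2] at hgt'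
  | case2 =>
    rename_i i hin hngt hltc
    intro h1 h2 H
    left
    refine ⟨rfl, ?_⟩
    apply agree_lt cs i.toNat cm.toNat left'.toNat (by omega) (by omega)
    · intro t ht
      have hT := H (t : Int) (by omega) (by omega)
      rw [pg_bridge cs (cm + (t : Int)) (by omega) (by omega),
        pg_bridge cs (left' + (t : Int)) (by omega) (by omega)] at hT
      have e1 : (cm + (t : Int)).toNat = cm.toNat + t := by omega
      have e2 : (left' + (t : Int)).toNat = left'.toNat + t := by omega
      rwa [e1, e2] at hT
    · have hltc' := hltc
      rw [pg_bridge cs (cm + i) (by omega) (by omega),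
        pg_bridge cs (left' + i) (by omega) (by omega)] at hltc'
      have e1 : (cm + i).toNat = cm.toNat + i.toNat := by omega
      have e2 : (left' + i).toNat = left'.toNat + i.toNat := by omega
      rwa [e1, e2] at hltc'
  | case3 =>
    rename_i i hin hngt hnlt ih
    intro h1 h2 H
    apply ih (by omega) (by omega)
    intro t ht0 ht1
    by_cases htI : t < i
    · exact H t ht0 htI
    · have : t = i := by omega
      subst this
      exact le_antisymm (not_lt.mp hngt) (not_lt.mp hnlt)
  | case4 =>
    rename_i i hnin
    intro h1 h2 H
    left
    refine ⟨rfl, ?_⟩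
    have hn : cm + i = (cs.length : Int) := by omega
    apply agree_prefix cs (cs.length - cm.toNat) left'.toNat cm.toNat rfl (by omega) (by omega)
    intro u hu
    have hT := H (u : Int) (by omega) (by omega)
    rw [pg_bridge cs (cm + (u : Int)) (by omega) (by omega),
      pg_bridge cs (left' + (u : Int)) (by omega) (by omega)] at hT
    have e1 : (cm + (u : Int)).toNat = cm.toNat + u := by omega
    have e2 : (left' + (u : Int)).toNat = left'.toNat + u := by omega
    rw [e1, e2] at hT
    exact hT.symm

-- the outer loop's invariant: cur_max always points at the best suffix seen so far
theorem loopA_spec (cs : List Char) : ∀ cm left : Int,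
    0 ≤ cm → cm < (cs.length : Int) → left < cm →
    (∀ j : Int, left < j → j < (cs.length : Int) → cs.drop j.toNat ≤ cs.drop cm.toNat) →
    0 ≤ loopA cs cm left ∧ loopA cs cm left < (cs.length : Int) ∧
      ∀ j : Int, 0 ≤ j → j < (cs.length : Int) →
        cs.drop j.toNat ≤ cs.drop (loopA cs cm left).toNat := by
  intro cm left
  fun_induction loopA cs cm left with
  | case1 =>
    rename_i cm left hg hgt ih
    intro h1 h2 h3 H
    have hln : left < (cs.length : Int) := by omega
    have hdc : cs.drop cm.toNat < cs.drop left.toNat := by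
      apply agree_lt cs 0 cm.toNat left.toNat (by omega) (by omega)
      · intro t ht
        exact absurd ht (Nat.not_lt_zero t)
      · have hgt' := hgt
        rw [pg_bridge cs left (by omega) hln, pg_bridge cs cm h1 h2] at hgt'
        simpa using hgt'
    apply ih (by omega) hln (by omega)
    intro j hj1 hj2
    by_cases hj : left < j
    · exact le_trans (H j (by omega) hj2) (le_of_lt hdc)
    · have : j = left := by omega
      rw [this]
  | case2 =>
    rename_i cm left hg hng heq left' hcmp ih
    intro h1 h2 h3 H
    have hL : left' = skipA cs left := rfl
    have hL0 : (0 : Int) ≤ left' := by rw [hL]; exact skipA_nonneg cs left (by omega)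
    have hLle : left' ≤ left := by rw [hL]; exact skipA_le cs left
    have hln : left < (cs.length : Int) := by omega
    have Hpair : ∀ m : Nat, left'.toNat ≤ m → m < left.toNat →
        cs.getD m ' ' = cs.getD (m + 1) ' ' := by
      intro m hm1 hm2
      have hrun := skipA_run cs left (m : Int) (by omega) (by omega)
      rw [pg_bridge cs (m : Int) (by omega) (by omega),
        pg_bridge cs ((m : Int) + 1) (by omega) (by omega)] at hrun
      have e1 : ((m : Int)).toNat = m := by omega
      have e2 : ((m : Int) + 1).toNat = m + 1 := by omega
      rwa [e1, e2] at hrun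
    have hagree1 : ∀ t : Int, 0 ≤ t → t < 1 →
        PySem.List.pyGetD cs (cm + t) ' ' = PySem.List.pyGetD cs (left' + t) ' ' := by
      intro t ht0 ht1
      have : t = 0 := by omega
      subst this
      rw [add_zero, add_zero, pg_bridge cs cm h1 h2, pg_bridge cs left' hL0 (by omega)]
      have h5 : cs.getD left'.toNat ' ' = cs.getD left.toNat ' ' :=
        run_const cs left'.toNat left.toNat Hpair left'.toNat le_rfl (by omega)
      rw [h5]
      have heq' := heq
      rw [pg_bridge cs left (by omega) hln, pg_bridge cs cm h1 h2] at heq'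
      exact heq'.symm
    have hspec := cmpA_spec cs cm left' hL0 (by omega) h2 1 le_rfl (by omega) hagree1
    have hnext : cs.drop (left.toNat + 1) ≤ cs.drop cm.toNat := by
      have := H (left + 1) (by omega) (by omega)
      have e : (left + 1).toNat = left.toNat + 1 := by omega
      rwa [e] at this
    have hrunbound : ∀ j : Int, left' < j → j ≤ left →
        cs.drop j.toNat ≤ cs.drop (left.toNat + 1) ∨ cs.drop j.toNat ≤ cs.drop left'.toNat := by
      intro j hj1 hj2
      rcases lt_or_ge (cs.drop (left.toNat + 1)) (cs.drop left.toNat) with hb | hb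
      · exact Or.inr (chain_down cs left'.toNat left.toNat (by omega) Hpair hb j.toNat
          (by omega) (by omega))
      · exact Or.inl (chain_up cs left'.toNat left.toNat (by omega) Hpair hb j.toNat
          (by omega) (by omega))
    rcases hspec with ⟨-, hdlt⟩ | ⟨hone, -⟩
    · apply ih hL0 (by omega) (by omega)
      intro j hj1 hj2
      by_cases hjl : j ≤ left'
      · have : j = left' := by omega
        rw [this]
      · by_cases hjle : j ≤ left
        · rcases hrunbound j (by omega) hjle with hc | hc
          · exact le_trans hc (le_trans hnext (le_of_lt hdlt))
          · exact hc
        · exact le_trans (H j (by omega) hj2) (le_of_lt hdlt)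
    · rw [hcmp] at hone
      exact absurd hone (by decide)
  | case3 =>
    rename_i cm left hg hng heq left' hcmp ih
    intro h1 h2 h3 H
    have hL : left' = skipA cs left := rfl
    have hL0 : (0 : Int) ≤ left' := by rw [hL]; exact skipA_nonneg cs left (by omega)
    have hLle : left' ≤ left := by rw [hL]; exact skipA_le cs left
    have hln : left < (cs.length : Int) := by omega
    have Hpair : ∀ m : Nat, left'.toNat ≤ m → m < left.toNat →
        cs.getD m ' ' = cs.getD (m + 1) ' ' := by
      intro m hm1 hm2
      have hrun := skipA_run cs left (m : Int) (by omega) (by omega)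
      rw [pg_bridge cs (m : Int) (by omega) (by omega),
        pg_bridge cs ((m : Int) + 1) (by omega) (by omega)] at hrun
      have e1 : ((m : Int)).toNat = m := by omega
      have e2 : ((m : Int) + 1).toNat = m + 1 := by omega
      rwa [e1, e2] at hrun
    have hagree1 : ∀ t : Int, 0 ≤ t → t < 1 →
        PySem.List.pyGetD cs (cm + t) ' ' = PySem.List.pyGetD cs (left' + t) ' ' := by
      intro t ht0 ht1
      have : t = 0 := by omega
      subst this
      rw [add_zero, add_zero, pg_bridge cs cm h1 h2, pg_bridge cs left' hL0 (by omega)]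
      have h5 : cs.getD left'.toNat ' ' = cs.getD left.toNat ' ' :=
        run_const cs left'.toNat left.toNat Hpair left'.toNat le_rfl (by omega)
      rw [h5]
      have heq' := heq
      rw [pg_bridge cs left (by omega) hln, pg_bridge cs cm h1 h2] at heq'
      exact heq'.symm
    have hspec := cmpA_spec cs cm left' hL0 (by omega) h2 1 le_rfl (by omega) hagree1
    have hnext : cs.drop (left.toNat + 1) ≤ cs.drop cm.toNat := by
      have := H (left + 1) (by omega) (by omega)
      have e : (left + 1).toNat = left.toNat + 1 := by omega
      rwa [e] at this
    have hrunbound : ∀ j : Int, left' < j → j ≤ left →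
        cs.drop j.toNat ≤ cs.drop (left.toNat + 1) ∨ cs.drop j.toNat ≤ cs.drop left'.toNat := by
      intro j hj1 hj2
      rcases lt_or_ge (cs.drop (left.toNat + 1)) (cs.drop left.toNat) with hb | hb
      · exact Or.inr (chain_down cs left'.toNat left.toNat (by omega) Hpair hb j.toNat
          (by omega) (by omega))
      · exact Or.inl (chain_up cs left'.toNat left.toNat (by omega) Hpair hb j.toNat
          (by omega) (by omega))
    rcases hspec with ⟨hzero, -⟩ | ⟨-, hdgt⟩
    · exact absurd hzero hcmp
    · apply ih h1 h2 (by omega)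
      intro j hj1 hj2
      by_cases hjl : j ≤ left'
      · have : j = left' := by omega
        rw [this]
        exact le_of_lt hdgt
      · by_cases hjle : j ≤ left
        · rcases hrunbound j (by omega) hjle with hc | hc
          · exact le_trans hc hnext
          · exact le_trans hc (le_of_lt hdgt)
        · exact H j (by omega) hj2
  | case4 =>
    rename_i cm left hg hng hne ih
    intro h1 h2 h3 H
    have hln : left < (cs.length : Int) := by omega
    have hlt : cs.drop left.toNat < cs.drop cm.toNat := by
      apply agree_lt cs 0 left.toNat cm.toNat (by omega) (by omega)
      · intro t ht
        exact absurd ht (Nat.not_lt_zero t)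
      · have hlt' := lt_of_le_of_ne (not_lt.mp hng) hne
        rw [pg_bridge cs left (by omega) hln, pg_bridge cs cm h1 h2] at hlt'
        simpa using hlt'
    apply ih h1 h2 (by omega)
    intro j hj1 hj2
    by_cases hj : left < j
    · exact H j hj hj2
    · have : j = left := by omega
      rw [this]
      exact le_of_lt hlt
  | case5 =>
    rename_i cm left hg
    intro h1 h2 h3 H
    exact ⟨h1, h2, fun j hj1 hj2 => H j (by omega) hj2⟩

-- ---- B-side loop facts ----

-- the two-pointer loop's invariant: every index below j other than i is beaten by some suffix
theorem duval_spec (cs : List Char) : ∀ i j k : Nat,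
    i < j → j + k ≤ cs.length →
    (∀ t, t < k → cs.getD (i + t) ' ' = cs.getD (j + t) ' ') →
    (∀ m, m < j → m ≠ i → ∃ m', m' < cs.length ∧ cs.drop m < cs.drop m') →
    duvalLoop cs i j k < cs.length ∧
      ∀ m, m < cs.length → m ≠ duvalLoop cs i j k →
        ∃ m', m' < cs.length ∧ cs.drop m < cs.drop m' := by
  intro i j k
  fun_induction duvalLoop cs i j k with
  | case1 =>
    rename_i i j k hg a b heq ih
    intro hij hjk Hag Hbeat
    apply ih hij (by omega) ?_ Hbeat
    intro t ht
    by_cases htk : t < k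
    · exact Hag t htk
    · have : t = k := by omega
      subst this
      have h2 : PySem.List.pyGetD cs ((i + t : Nat) : Int) ' '
          = PySem.List.pyGetD cs ((j + t : Nat) : Int) ' ' := heq
      rwa [pgn cs (i + t), pgn cs (j + t)] at h2
  | case2 =>
    rename_i i j k hg a b hne hgtb ih
    intro hij hjk Hag Hbeat
    have hgt : cs.getD (j + k) ' ' < cs.getD (i + k) ' ' := by
      have h2 : PySem.List.pyGetD cs ((j + k : Nat) : Int) ' '
          < PySem.List.pyGetD cs ((i + k : Nat) : Int) ' ' := hgtb
      rwa [pgn cs (j + k), pgn cs (i + k)] at h2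
    apply ih (by omega) (by omega) (by intro t ht; exact absurd ht (Nat.not_lt_zero t)) ?_
    intro m hm hmne
    by_cases hmj : m < j
    · exact Hbeat m hmj hmne
    · refine ⟨i + (m - j), by omega, ?_⟩
      set t := m - j with htdef
      have hm' : m = j + t := by omega
      rw [hm']
      apply agree_lt cs (k - t) (j + t) (i + t) (by omega) (by omega)
      · intro u hu
        have hA := Hag (t + u) (by omega)
        have e1 : i + (t + u) = i + t + u := by omega
        have e2 : j + (t + u) = j + t + u := by omega
        rw [e1, e2] at hA
        exact hA.symm
      · have e1 : j + t + (k - t) = j + k := by omega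
        have e2 : i + t + (k - t) = i + k := by omega
        rw [e1, e2]
        exact hgt
  | case3 =>
    rename_i i j k hg a b hne hngt i' ih
    intro hij hjk Hag Hbeat
    have hlt : cs.getD (i + k) ' ' < cs.getD (j + k) ' ' := by
      have h2 := lt_of_le_of_ne (not_lt.mp hngt) hne
      have h3 : PySem.List.pyGetD cs ((i + k : Nat) : Int) ' '
          < PySem.List.pyGetD cs ((j + k : Nat) : Int) ' ' := h2
      rwa [pgn cs (i + k), pgn cs (j + k)] at h3
    have hi' : i' = max (i + k + 1) j := rfl
    apply ih (by omega) (by omega) (by intro t ht; exact absurd ht (Nat.not_lt_zero t)) ?_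
    intro m hm hmne
    by_cases hmi : m = i
    · refine ⟨j, by omega, ?_⟩
      rw [hmi]
      exact agree_lt cs k i j (by omega) (by omega) Hag hlt
    · by_cases hmj : m < j
      · exact Hbeat m hmj hmi
      · have hmk : m ≤ i + k := by omega
        set t := m - i with htdef
        have hm' : m = i + t := by omega
        refine ⟨j + t, by omega, ?_⟩
        rw [hm']
        apply agree_lt cs (k - t) (i + t) (j + t) (by omega) (by omega)
        · intro u hu
          have hA := Hag (t + u) (by omega)
          have e1 : i + (t + u) = i + t + u := by omega
          have e2 : j + (t + u) = j + t + u := by omega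
          rwa [e1, e2] at hA
        · have e1 : i + t + (k - t) = i + k := by omega
          have e2 : j + t + (k - t) = j + k := by omega
          rw [e1, e2]
          exact hlt
  | case4 =>
    rename_i i j k hg
    intro hij hjk Hag Hbeat
    have hjkn : j + k = cs.length := by omega
    refine ⟨by omega, ?_⟩
    intro m hm hmne
    by_cases hmj : m < j
    · exact Hbeat m hmj hmne
    · set t := m - j with htdef
      have hm' : m = j + t := by omega
      refine ⟨i + t, by omega, ?_⟩
      rw [hm']
      apply agree_prefix cs (cs.length - (j + t)) (i + t) (j + t) rfl (by omega) (by omega)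
      intro u hu
      have hA := Hag (t + u) (by omega)
      have e1 : i + (t + u) = i + t + u := by omega
      have e2 : j + (t + u) = j + t + u := by omega
      rwa [e1, e2] at hA

-- ===== VERDICT (by name: the statement is the Claim_ definition above) =====
theorem lastSubstring_spec : Claim_equal_lastSubstring := by
  intro s _
  show lastSubstring s = lastSubstring_alt s
  rcases Nat.eq_zero_or_pos s.toList.length with h0 | hpos
  · have hnil : s.toList = [] := by
      cases hcs : s.toList with
      | nil => rfl
      | cons x xs => rw [hcs] at h0; simp at h0
    simp [lastSubstring, lastSubstring_alt, hnil, loopA, duvalLoop,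
      PySem.List.slice_some_none]
  · obtain ⟨hA0, hAn, hAmax⟩ := loopA_spec s.toList ((s.toList.length : Int) - 1)
      ((s.toList.length : Int) - 2) (by omega) (by omega) (by omega)
      (by
        intro j hj1 hj2
        have : j = (s.toList.length : Int) - 1 := by omega
        rw [this])
    obtain ⟨hBn, hBbeat⟩ := duval_spec s.toList 0 1 0 (by omega) (by omega)
      (by intro t ht; exact absurd ht (Nat.not_lt_zero t))
      (by
        intro m hm hmne
        have : m = 0 := by omega
        exact absurd this hmne)
    have hEq : (loopA s.toList ((s.toList.length : Int) - 1)
        ((s.toList.length : Int) - 2)).toNat = duvalLoop s.toList 0 1 0 := by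
      by_contra hne
      obtain ⟨m', hm'n, hlt⟩ := hBbeat (loopA s.toList ((s.toList.length : Int) - 1)
        ((s.toList.length : Int) - 2)).toNat (by omega) hne
      have hub := hAmax (m' : Int) (by omega) (by omega)
      have e : ((m' : Nat) : Int).toNat = m' := by omega
      rw [e] at hub
      exact absurd (lt_of_lt_of_le hlt hub) (lt_irrefl _)
    simp only [lastSubstring, lastSubstring_alt]
    rw [PySem.List.slice_from s.toList hA0, PySem.List.slice_from s.toList
      (by omega : (0 : Int) ≤ ((duvalLoop s.toList 0 1 0 : Nat) : Int)), hEq]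
    simp
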